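-- pv_equiv track=rewrite | github.com/dongwookim-ml/deep-distant-supervision | data_utils/data_utils.py | extract_ners
-- ===== SOURCE A (Python) =====
-- IGNORE_NER_TAG = ('O', 'DATE', 'NUMBER', 'ORDINAL')  # Non-NER tag
--
-- def extract_ners(tokens):
--     """
--     Extract consecutive ners from the result of CoreNLPNERTagger
--     :param tokens: list of tuple with token and tag
--     :return: list of tuple with list of tokens and corresponding tag
--     """
--     ners = list()
--     new_tokens = list()
--
--     candid_entity = list()
--     keep = False
--     prev_tag = 'O'
--
--     for i, (token, tag) in enumerate(tokens):
--         if keep: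
--             if tag not in IGNORE_NER_TAG:
--                 if prev_tag == tag:
--                     candid_entity.append(token)
--                     keep = True
--                 else:
--                     ners.append((candid_entity, prev_tag))
--                     candid_entity = list()
--                     candid_entity.append(token)
--                     keep = True
--             else:
--                 ners.append((candid_entity, prev_tag))
--                 keep = False
--         else:
--             if tag not in IGNORE_NER_TAG:
--                 candid_entity = list()
--                 candid_entity.append(token)
--                 keep = True
--         prev_tag = tag
--
--     return ners
-- ===== SOURCE B (Python) =====
-- IGNORE_NER_TAG = ('O', 'DATE', 'NUMBER', 'ORDINAL')  # Non-NER tag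
--
-- def extract_ners(tokens):
--     # Two phases: split the input into maximal runs of equal tag, then keep
--     # every non-ignored run except the final run (which A never flushes).
--     runs = []
--     i = 0
--     n = len(tokens)
--     while i < n:
--         tag = tokens[i][1]
--         j = i
--         while j < n and tokens[j][1] == tag:
--             j += 1
--         runs.append(([tok for tok, _ in tokens[i:j]], tag))
--         i = j
--     return [(toks, tag) for toks, tag in runs[:-1] if tag not in IGNORE_NER_TAG]
-- ===== Notes on version B (the rewrite author's own statement) =====
-- stated objective: simpler
-- what changed: Replaces A's single-pass four-variable state machine (ners/candid_entity/keep/prev_tag) by a two-phase decomposition: split the input into maximal runs of equal tag, then keep every non-ignored run except the final run (which A never flushes).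
import Mathlib
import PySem

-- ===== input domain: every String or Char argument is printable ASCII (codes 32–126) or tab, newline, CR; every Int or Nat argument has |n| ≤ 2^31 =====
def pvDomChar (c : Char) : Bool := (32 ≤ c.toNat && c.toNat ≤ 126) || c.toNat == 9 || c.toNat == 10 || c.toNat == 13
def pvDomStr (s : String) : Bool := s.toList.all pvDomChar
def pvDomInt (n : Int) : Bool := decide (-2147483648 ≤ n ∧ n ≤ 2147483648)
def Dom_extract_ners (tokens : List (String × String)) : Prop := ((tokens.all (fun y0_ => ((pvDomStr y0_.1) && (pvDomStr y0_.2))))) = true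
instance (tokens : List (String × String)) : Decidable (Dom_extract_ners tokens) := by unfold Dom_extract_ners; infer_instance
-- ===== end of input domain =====

-- B replaces A's four-variable state machine by two phases (split into maximal
-- equal-tag runs, then filter the runs, dropping the trailing run A never flushes);
-- objective: simpler decomposition, same cost.

def pvIgnoreTags : List String := ["O", "DATE", "NUMBER", "ORDINAL"]

-- ===== PORT A =====
-- one step of A's for-loop; state = (ners, candid_entity, keep, prev_tag)
def pvStepA (s : List (List String × String) × List String × Bool × String)
    (tok : String × String) : List (List String × String) × List String × Bool × String :=
  let (ners, candid, keep, prev) := s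
  let (token, tag) := tok
  if keep then
    if !(pvIgnoreTags.contains tag) then
      if prev == tag then (ners, candid ++ [token], true, tag)
      else (ners ++ [(candid, prev)], [token], true, tag)
    else (ners ++ [(candid, prev)], candid, false, tag)
  else
    if !(pvIgnoreTags.contains tag) then (ners, [token], true, tag)
    else (ners, candid, false, tag)

def extract_ners (tokens : List (String × String)) : List (List String × String) :=
  (tokens.foldl pvStepA ([], [], false, "O")).1

-- ===== PORT B =====
-- phase 1 of Source B: split into maximal runs of equal tag (the inner while-scan
-- is the takeWhile/dropWhile on the remainder)
def pvRuns : List (String × String) → List (List String × String)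
  | [] => []
  | (t, g) :: rest =>
    (t :: (rest.takeWhile (fun q => q.2 == g)).map Prod.fst, g)
      :: pvRuns (rest.dropWhile (fun q => q.2 == g))
termination_by l => l.length
decreasing_by
  simp only [List.length_cons]
  exact Nat.lt_succ_of_le (List.length_dropWhile_le _ _)

-- phase 2 of Source B: runs[:-1] filtered by tag
def extract_ners_alt (tokens : List (String × String)) : List (List String × String) :=
  (pvRuns tokens).dropLast.filter (fun r => !(pvIgnoreTags.contains r.2))

-- ===== PRECONDITION & SPEC =====
def Spec_extract_ners (tokens : List (String × String)) (out : List (List String × String)) : Prop := out = extract_ners_alt tokens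
instance (tokens : List (String × String)) (out : List (List String × String)) : Decidable (Spec_extract_ners tokens out) := by unfold Spec_extract_ners; infer_instance

-- ===== CLAIM (what is proved, stated in full; the proofs are below) =====
def Claim_equal_extract_ners : Prop := ∀ (tokens : List (String × String)), Dom_extract_ners tokens → Spec_extract_ners tokens (extract_ners tokens)

-- ===== LEMMAS AND PROOFS =====

-- dropLast-then-filter, the shape of B's phase 2
def pvFDL (L : List (List String × String)) : List (List String × String) :=
  L.dropLast.filter (fun r => !(pvIgnoreTags.contains r.2))

-- A's state machine, written as mutual recursion: keep=false / keep=true (open run cand tagged p)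
mutual
def pvFresh : List (String × String) → List (List String × String)
  | [] => []
  | (t, g) :: rest =>
    if pvIgnoreTags.contains g then pvFresh rest
    else pvOpen g [t] rest
def pvOpen (p : String) (cand : List String) :
    List (String × String) → List (List String × String)
  | [] => []
  | (t, g) :: rest =>
    if pvIgnoreTags.contains g then (cand, p) :: pvFresh rest
    else if p == g then pvOpen p (cand ++ [t]) rest
    else (cand, p) :: pvOpen g [t] rest
end

-- A's fold equals the state machine, for both values of keep
theorem loopA (tokens : List (String × String)) :
    (∀ ners cand p, (List.foldl pvStepA (ners, cand, false, p) tokens).1 = ners ++ pvFresh tokens)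
    ∧ (∀ ners cand p, (List.foldl pvStepA (ners, cand, true, p) tokens).1 = ners ++ pvOpen p cand tokens) := by
  induction tokens with
  | nil => simp [pvFresh, pvOpen]
  | cons tok rest ih =>
    obtain ⟨t, g⟩ := tok
    constructor
    · intro ners cand p
      by_cases h : g ∈ pvIgnoreTags
      · simp [List.foldl_cons, pvStepA, h, pvFresh, ih.1]
      · simp [List.foldl_cons, pvStepA, h, pvFresh, ih.2]
    · intro ners cand p
      by_cases h : g ∈ pvIgnoreTags
      · simp [List.foldl_cons, pvStepA, h, pvOpen, ih.1]
      · by_cases hpg : p = g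
        · subst hpg
          simp [List.foldl_cons, pvStepA, h, pvOpen, ih.2]
        · have : (p == g) = false := by simp [hpg]
          simp [List.foldl_cons, pvStepA, h, this, pvOpen, ih.2]

theorem runs_ne_nil (x : String × String) (l : List (String × String)) :
    pvRuns (x :: l) ≠ [] := by
  obtain ⟨t, g⟩ := x
  simp [pvRuns]

theorem fdl_cons_ignore (a : List String) (g : String) (L : List (List String × String))
    (h : g ∈ pvIgnoreTags) : pvFDL ((a, g) :: L) = pvFDL L := by
  cases L with
  | nil => simp [pvFDL]
  | cons x xs => simp [pvFDL, List.dropLast_cons₂, h]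

theorem fdl_cons_keep (a : List String) (p : String) (L : List (List String × String))
    (h : p ∉ pvIgnoreTags) (hL : L ≠ []) :
    pvFDL ((a, p) :: L) = (a, p) :: pvFDL L := by
  cases L with
  | nil => exact absurd rfl hL
  | cons x xs => simp [pvFDL, List.dropLast_cons₂, h]

-- pvRuns over a uniform prefix: the prefix is absorbed into the first run
theorem runs_absorb (p : String) (c : String) (cs : List String) (L : List (String × String)) :
    pvRuns ((c :: cs).map (fun t => (t, p)) ++ L)
      = ((c :: cs) ++ (L.takeWhile (fun q => q.2 == p)).map Prod.fst, p)
          :: pvRuns (L.dropWhile (fun q => q.2 == p)) := by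
  simp [pvRuns, Function.comp_def]

-- dropping one leading ignored token does not change B's phase-2 value
theorem fdl_runs_cons_ignore (t g : String) (rest : List (String × String))
    (h : g ∈ pvIgnoreTags) :
    pvFDL (pvRuns ((t, g) :: rest)) = pvFDL (pvRuns rest) := by
  cases rest with
  | nil => simp [pvRuns, pvFDL]
  | cons x xs =>
    obtain ⟨t2, g2⟩ := x
    by_cases hg : g2 = g
    · subst hg
      rw [show pvRuns ((t, g2) :: (t2, g2) :: xs)
            = (t :: t2 :: (xs.takeWhile (fun q => q.2 == g2)).map Prod.fst, g2)
                :: pvRuns (xs.dropWhile (fun q => q.2 == g2)) by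
            simp [pvRuns]]
      rw [show pvRuns ((t2, g2) :: xs)
            = (t2 :: (xs.takeWhile (fun q => q.2 == g2)).map Prod.fst, g2)
                :: pvRuns (xs.dropWhile (fun q => q.2 == g2)) by
            simp [pvRuns]]
      rw [fdl_cons_ignore _ _ _ h, fdl_cons_ignore _ _ _ h]
    · have hx : (g2 == g) = false := by simp [hg]
      rw [show pvRuns ((t, g) :: (t2, g2) :: xs)
            = ([t], g) :: pvRuns ((t2, g2) :: xs) by
            simp [pvRuns, hx]]
      rw [fdl_cons_ignore _ _ _ h]

-- the main B-side invariant, by strong induction on the length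
theorem mainB : ∀ (n : ℕ) (tokens : List (String × String)), tokens.length ≤ n →
    (pvFresh tokens = pvFDL (pvRuns tokens))
    ∧ (∀ p c cs, p ∉ pvIgnoreTags →
        pvOpen p (c :: cs) tokens
          = pvFDL (pvRuns ((c :: cs).map (fun t => (t, p)) ++ tokens))) := by
  intro n
  induction n with
  | zero =>
    intro tokens h
    have : tokens = [] := List.eq_nil_of_length_eq_zero (Nat.le_zero.mp h)
    subst this
    refine ⟨by simp [pvFresh, pvRuns, pvFDL], ?_⟩
    intro p c cs hp
    rw [runs_absorb p c cs []]
    simp [pvOpen, pvRuns, pvFDL]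
  | succ n ih =>
    intro tokens hlen
    cases tokens with
    | nil =>
      refine ⟨by simp [pvFresh, pvRuns, pvFDL], ?_⟩
      intro p c cs hp
      rw [runs_absorb p c cs []]
      simp [pvOpen, pvRuns, pvFDL]
    | cons tok rest =>
      obtain ⟨t, g⟩ := tok
      have hrest : rest.length ≤ n := by
        simpa using Nat.lt_succ_iff.mp (Nat.lt_of_lt_of_le (by simp) hlen)
      constructor
      · -- fresh case
        by_cases h : g ∈ pvIgnoreTags
        · rw [show pvFresh ((t, g) :: rest) = pvFresh rest by simp [pvFresh, h]]
          rw [(ih rest hrest).1, fdl_runs_cons_ignore t g rest h]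
        · rw [show pvFresh ((t, g) :: rest) = pvOpen g [t] rest by simp [pvFresh, h]]
          rw [(ih rest hrest).2 g t [] h]
          simp
      · -- open case
        intro p c cs hp
        by_cases h : g ∈ pvIgnoreTags
        · have hpg : p ≠ g := fun e => hp (e ▸ h)
          have hgp : (g == p) = false := by simp [Ne.symm hpg]
          rw [show pvOpen p (c :: cs) ((t, g) :: rest)
                = (c :: cs, p) :: pvFresh rest by simp [pvOpen, h]]
          rw [runs_absorb]
          rw [show (((t, g) :: rest).takeWhile (fun q => q.2 == p)) = [] by
                simp [hgp]]
          rw [show (((t, g) :: rest).dropWhile (fun q => q.2 == p)) = (t, g) :: rest by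
                simp [hgp]]
          rw [fdl_cons_keep _ _ _ hp (runs_ne_nil _ _)]
          rw [fdl_runs_cons_ignore t g rest h, (ih rest hrest).1]
          simp
        · by_cases hpg : p = g
          · subst hpg
            rw [show pvOpen p (c :: cs) ((t, p) :: rest)
                  = pvOpen p ((c :: cs) ++ [t]) rest by simp [pvOpen, h]]
            rw [show (c :: cs) ++ [t] = c :: (cs ++ [t]) by simp]
            rw [(ih rest hrest).2 p c (cs ++ [t]) hp]
            rw [show ((c :: (cs ++ [t])).map (fun t' => (t', p)) ++ rest)
                  = ((c :: cs).map (fun t' => (t', p)) ++ (t, p) :: rest) by simp]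
          · have hpg' : (p == g) = false := by simp [hpg]
            have hgp : (g == p) = false := by simp [Ne.symm hpg]
            rw [show pvOpen p (c :: cs) ((t, g) :: rest)
                  = (c :: cs, p) :: pvOpen g [t] rest by simp [pvOpen, h, hpg']]
            rw [(ih rest hrest).2 g t [] h]
            rw [runs_absorb p c cs ((t, g) :: rest)]
            rw [show (((t, g) :: rest).takeWhile (fun q => q.2 == p)) = [] by
                  simp [hgp]]
            rw [show (((t, g) :: rest).dropWhile (fun q => q.2 == p)) = (t, g) :: rest by
                  simp [hgp]]
            rw [fdl_cons_keep _ _ _ hp (runs_ne_nil _ _)]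
            simp

-- ===== VERDICT (by name: the statement is the Claim_ definition above) =====
theorem extract_ners_spec : Claim_equal_extract_ners := by
  intro tokens _
  unfold Spec_extract_ners extract_ners extract_ners_alt
  rw [(loopA tokens).1 [] [] "O"]
  rw [(mainB tokens.length tokens le_rfl).1]
  rfl
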